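-- pv_equiv track=rewrite | github.com/shaw14789/Code_Watermark | Code/tcdw_refactor/tcdw_pkg/anchor_extractor.py | _prefer_two_to_three_token_anchors
-- ===== SOURCE A (Python) =====
-- from typing import List
--
-- def _dedup_keep_order(items: List[str]) -> List[str]:
--     out = []
--     seen = set()
--     for x in items:
--         k = x.lower().strip()
--         if not k:
--             continue
--         if k not in seen:
--             seen.add(k)
--             out.append(x.strip())
--     return out
--
-- def _prefer_two_to_three_token_anchors(items: List[str]) -> List[str]:
--     """
--     优先保留 2~3 token 的自然短片段。
--     如果没有，再保留 1 token 或更长片段。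
--     """
--     items = _dedup_keep_order(items)
--
--     two_three = []
--     others = []
--
--     for x in items:
--         n = len(x.split())
--         if 2 <= n <= 3:
--             two_three.append(x)
--         else:
--             others.append(x)
--
--     return two_three + others
-- ===== SOURCE B (Python) =====
-- def _prefer_two_to_three_token_anchors(items):
--     d = {}
--     for x in items:
--         k = x.lower().strip()
--         if k and k not in d:
--             d[k] = x.strip()
--     return sorted(d.values(), key=lambda x: 0 if 2 <= len(x.split()) <= 3 else 1)
-- ===== Notes on version B (the rewrite author's own statement) =====
-- stated objective: idiomatic
-- what changed: B replaces A's two-bucket partition loop by one stable sorted() on a binary key (0 for 2-3 tokens, 1 otherwise) and folds the dedup into a single first-wins dict keyed by the lowercased stripped string, returning its values.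
import Mathlib
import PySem

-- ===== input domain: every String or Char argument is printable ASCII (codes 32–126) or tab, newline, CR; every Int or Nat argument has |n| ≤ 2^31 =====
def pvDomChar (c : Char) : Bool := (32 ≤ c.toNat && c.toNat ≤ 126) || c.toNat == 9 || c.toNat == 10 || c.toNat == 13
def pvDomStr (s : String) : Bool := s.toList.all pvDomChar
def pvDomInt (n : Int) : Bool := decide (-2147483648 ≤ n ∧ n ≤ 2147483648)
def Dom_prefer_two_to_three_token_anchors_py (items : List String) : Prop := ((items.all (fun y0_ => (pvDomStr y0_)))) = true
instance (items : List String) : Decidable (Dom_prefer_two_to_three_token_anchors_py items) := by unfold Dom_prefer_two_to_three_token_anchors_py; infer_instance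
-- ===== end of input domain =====

-- B replaces the two-bucket partition loop by one stable sort on a binary key and the
-- set+list dedup by a single first-wins dict keyed by the lowercased stripped string (idiomatic rewrite).

-- ===== PORT A =====
def dedup_keep_order_py (items : List String) : List String :=
  (items.foldl (fun (st : List String × PySem.Set String) x =>
      let k := PySem.Str.strip (PySem.Str.lower x)
      if k = "" then st
      else if PySem.Set.contains st.2 k then st
      else (st.1 ++ [PySem.Str.strip x], PySem.Set.add st.2 k)) ([], PySem.Set.empty)).1

def prefer_two_to_three_token_anchors_py (items : List String) : List String :=
  let items := dedup_keep_order_py items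
  -- n = len(x.split()) inlined
  let st := items.foldl (fun (st : List String × List String) x =>
      if 2 ≤ (PySem.Str.split₀ x).length ∧ (PySem.Str.split₀ x).length ≤ 3
      then (st.1 ++ [x], st.2) else (st.1, st.2 ++ [x])) ([], [])
  st.1 ++ st.2

-- ===== PORT B =====
def prefer_two_to_three_token_anchors_py_alt (items : List String) : List String :=
  let d := items.foldl (fun (d : PySem.Dict String String) x =>
      let k := PySem.Str.strip (PySem.Str.lower x)
      if k = "" then d
      else if d.contains k then d
      else d.insert k (PySem.Str.strip x)) PySem.Dict.empty
  PySem.List.sorted d.values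
    (fun x => if 2 ≤ (PySem.Str.split₀ x).length ∧ (PySem.Str.split₀ x).length ≤ 3 then (0 : Int) else 1) false

-- ===== PRECONDITION & SPEC =====
def Spec_prefer_two_to_three_token_anchors_py (items : List String) (out : List String) : Prop := out = prefer_two_to_three_token_anchors_py_alt items
instance (items : List String) (out : List String) : Decidable (Spec_prefer_two_to_three_token_anchors_py items out) := by unfold Spec_prefer_two_to_three_token_anchors_py; infer_instance

-- ===== CLAIM (what is proved, stated in full; the proofs are below) =====
def Claim_equal_prefer_two_to_three_token_anchors_py : Prop := ∀ (items : List String), Dom_prefer_two_to_three_token_anchors_py items → Spec_prefer_two_to_three_token_anchors_py items (prefer_two_to_three_token_anchors_py items)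

-- ===== LEMMAS AND PROOFS =====

-- the 2≤tokens≤3 predicate and the binary sort key
def pvP (x : String) : Bool := decide (2 ≤ (PySem.Str.split₀ x).length ∧ (PySem.Str.split₀ x).length ≤ 3)
def pvKey (x : String) : Int := if 2 ≤ (PySem.Str.split₀ x).length ∧ (PySem.Str.split₀ x).length ≤ 3 then (0 : Int) else 1

theorem pvKey_eq (x : String) : pvKey x = if pvP x then 0 else 1 := by
  simp [pvKey, pvP]

theorem pvKey_le_one (x : String) : pvKey x ≤ 1 := by
  rw [pvKey_eq]; split <;> omega

-- inserting a key-1 element goes to the very end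
theorem insertBy_np (x : String) (hx : pvP x = false) (L : List String) :
    PySem.List.insertBy (fun a b => decide (pvKey a < pvKey b)) x L = L ++ [x] := by
  induction L with
  | nil => rfl
  | cons b L ih =>
      have : ¬ (pvKey x < pvKey b) := by
        have := pvKey_le_one b
        rw [pvKey_eq, hx]; simp; omega
      simp [PySem.List.insertBy, this, ih]

-- inserting a key-0 element goes right after the key-0 block
theorem insertBy_p (x : String) (hx : pvP x = true) (A B : List String)
    (hA : ∀ a ∈ A, pvP a = true) (hB : ∀ b ∈ B, pvP b = false) :
    PySem.List.insertBy (fun a b => decide (pvKey a < pvKey b)) x (A ++ B) = A ++ x :: B := by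
  induction A with
  | nil =>
      cases B with
      | nil => rfl
      | cons b B =>
          have hb := hB b (by simp)
          have : pvKey x < pvKey b := by rw [pvKey_eq, pvKey_eq, hx, hb]; simp
          simp [PySem.List.insertBy, this]
  | cons a A ih =>
      have ha := hA a (by simp)
      have : ¬ (pvKey x < pvKey a) := by rw [pvKey_eq, pvKey_eq, hx, ha]; simp
      simp only [List.cons_append, PySem.List.insertBy, this, decide_false]
      rw [ih (fun a ha' => hA a (by simp [ha']))]
      simp

-- insertion sort with the binary key is exactly the two-bucket partition
theorem foldl_insertBy_partition (l A B : List String)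
    (hA : ∀ a ∈ A, pvP a = true) (hB : ∀ b ∈ B, pvP b = false) :
    l.foldl (fun acc x => PySem.List.insertBy (fun a b => decide (pvKey a < pvKey b)) x acc) (A ++ B)
      = (A ++ l.filter pvP) ++ (B ++ l.filter (fun x => ! pvP x)) := by
  induction l generalizing A B with
  | nil => simp
  | cons x l ih =>
      by_cases hx : pvP x = true
      · have hA' : ∀ a ∈ A ++ [x], pvP a = true := by
          intro a ha
          rcases List.mem_append.1 ha with h | h
          · exact hA a h
          · simp at h; subst h; exact hx
        have e : A ++ x :: B = (A ++ [x]) ++ B := by simp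
        simp only [List.foldl_cons, insertBy_p x hx A B hA hB, e, ih (A ++ [x]) B hA' hB]
        simp [hx]
      · have hx' : pvP x = false := by simpa using hx
        have hB' : ∀ b ∈ B ++ [x], pvP b = false := by
          intro b hb
          rcases List.mem_append.1 hb with h | h
          · exact hB b h
          · simp at h; subst h; exact hx'
        have e : PySem.List.insertBy (fun a b => decide (pvKey a < pvKey b)) x (A ++ B) = A ++ (B ++ [x]) := by
          rw [insertBy_np x hx' (A ++ B)]; simp
        simp only [List.foldl_cons, e, ih A (B ++ [x]) hA hB']
        simp [hx']

theorem sorted_key_eq_partition (l : List String) :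
    PySem.List.sorted l pvKey false = l.filter pvP ++ l.filter (fun x => ! pvP x) := by
  rw [PySem.List.sorted_eq_foldl_insertBy]
  simpa using foldl_insertBy_partition l [] [] (by simp) (by simp)

-- A's partition loop computes the two filters
theorem partition_foldl (l : List String) (acc1 acc2 : List String) :
    l.foldl (fun (st : List String × List String) x =>
        if 2 ≤ (PySem.Str.split₀ x).length ∧ (PySem.Str.split₀ x).length ≤ 3
        then (st.1 ++ [x], st.2) else (st.1, st.2 ++ [x])) (acc1, acc2)
      = (acc1 ++ l.filter pvP, acc2 ++ l.filter (fun x => ! pvP x)) := by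
  induction l generalizing acc1 acc2 with
  | nil => simp
  | cons x l ih =>
      by_cases hx : 2 ≤ (PySem.Str.split₀ x).length ∧ (PySem.Str.split₀ x).length ≤ 3
      · have hp : pvP x = true := by simp [pvP, hx]
        simp only [List.foldl_cons, if_pos hx, ih, List.filter_cons, hp]
        simp
      · have hp : pvP x = false := by simp [pvP]; omega
        simp only [List.foldl_cons, if_neg hx, ih, List.filter_cons, hp]
        simp

-- A's set+list dedup and B's dict dedup keep the same values in the same order
theorem dedup_rel (l : List String) (out : List String) (seen : PySem.Set String)
    (d : PySem.Dict String String)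
    (hv : out = d.values) (hc : ∀ k, seen.contains k = d.contains k) :
    (l.foldl (fun (st : List String × PySem.Set String) x =>
        let k := PySem.Str.strip (PySem.Str.lower x)
        if k = "" then st
        else if PySem.Set.contains st.2 k then st
        else (st.1 ++ [PySem.Str.strip x], PySem.Set.add st.2 k)) (out, seen)).1
      = (l.foldl (fun (d : PySem.Dict String String) x =>
          let k := PySem.Str.strip (PySem.Str.lower x)
          if k = "" then d
          else if d.contains k then d
          else d.insert k (PySem.Str.strip x)) d).values := by
  induction l generalizing out seen d with
  | nil => simpa using hv
  | cons x l ih =>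
      simp only [List.foldl_cons]
      set k := PySem.Str.strip (PySem.Str.lower x) with hk
      by_cases h0 : k = ""
      · simp only [if_pos h0]
        exact ih out seen d hv hc
      · simp only [if_neg h0, hc k]
        by_cases h1 : d.contains k = true
        · simp only [h1, if_true]
          exact ih out seen d hv hc
        · have h1' : d.contains k = false := by simpa using h1
          simp only [h1', Bool.false_eq_true, if_false]
          apply ih
          · rw [hv]
            simp [PySem.Dict.values, PySem.Dict.items_insert, h1']
          · intro k'
            have hns : seen.contains k = false := by rw [hc k]; exact h1'
            have hadd : seen.add k = seen ++ [k] := by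
              simp only [PySem.Set.add, hns, Bool.false_eq_true, if_false]
            rw [PySem.Dict.contains_insert, hadd]
            have h2 : decide (k' ∈ seen) = d.contains k' := by
              rw [← hc k']; simp [PySem.Set.contains]
            simp [PySem.Set.contains, h2, Bool.or_comm, beq_eq_decide]

-- ===== VERDICT (by name: the statement is the Claim_ definition above) =====
theorem prefer_two_to_three_token_anchors_py_spec : Claim_equal_prefer_two_to_three_token_anchors_py := by
  intro items _
  unfold Spec_prefer_two_to_three_token_anchors_py
  unfold prefer_two_to_three_token_anchors_py prefer_two_to_three_token_anchors_py_alt dedup_keep_order_py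
  rw [dedup_rel items [] PySem.Set.empty PySem.Dict.empty rfl (by intro k; rfl)]
  simp only [partition_foldl]
  have : (fun x => if 2 ≤ (PySem.Str.split₀ x).length ∧ (PySem.Str.split₀ x).length ≤ 3 then (0 : Int) else 1) = pvKey := rfl
  rw [this, sorted_key_eq_partition]
  simp
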